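-- pv_equiv track=rewrite | github.com/zi007lin/tezos-ico-password-recovery-v2 | src/functions.py | sequenzernovsalt
-- ===== SOURCE A (Python) =====
-- import itertools
--
-- def sequenzernovsalt(L, V, W, X, Y, E):
--
--     sequ = []
--     output1 = ""
--     comp_count = V + W + X + Y
--     sequ_count = 0
--
--     if L == 1:
--         output1 = "L"
--     else:
--         output1 = ""
--     if comp_count == 4:
--         for subset in itertools.product("WXY", "WXY", "WXY"):
--             if L == 0:
--                 output1 = "V"
--             else:
--                 output1 = "LV"
--             for p in subset:
--                 output1 = output1 + p
--             if len(output1) != len(set(output1)):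
--                 output1 = ""
--                 continue
--             if E == 1:
--                 output1 = output1 + "E"
--             sequ.append(output1)
--             sequ_count += 1
--             output1 = ""
--     elif comp_count == 3:
--         for subset in itertools.product("WX", "WX"):
--             if L == 0:
--                 output1 = "V"
--             else:
--                 output1 = "LV"
--
--             for p in subset:
--                 output1 = output1 + p
--             if len(output1) != len(set(output1)):
--                 output1 = ""
--                 continue
--             if E == 1:
--                 output1 = output1 + "E"
--             sequ.append(output1)
--             sequ_count += 1
--             output1 = ""
--
--     elif comp_count == 2:
--         for subset in itertools.product("W"):
--             if L == 0:
--                 output1 = "V"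
--             else:
--                 output1 = "LV"
--             for p in subset:
--                 output1 = output1 + p
--             if len(output1) != len(set(output1)):
--                 output1 = ""
--                 continue
--             if E == 1:
--                 output1 = output1 + "E"
--             sequ.append(output1)
--             sequ_count += 1
--             output1 = ""
--
--     else:
--         if L == 0:
--             output1 = "V"
--         else:
--             output1 = "LV"
--
--         if E == 1:
--             output1 = output1 + "E"
--         sequ.append(output1)
--         sequ_count += 1
--         output1 = ""
--
--     sequ_no_vsalt = sequ
--     return sequ_no_vsalt
-- ===== SOURCE B (Python) =====
-- import itertools
--
-- def sequenzernovsalt(L, V, W, X, Y, E):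
--     prefix = "V" if L == 0 else "LV"
--     suffix = "E" if E == 1 else ""
--     pools = {4: "WXY", 3: "WX", 2: "W"}
--     pool = pools.get(V + W + X + Y)
--     if pool is None:
--         return [prefix + suffix]
--     return [prefix + "".join(p) + suffix for p in itertools.permutations(pool)]
-- ===== Notes on version B (the rewrite author's own statement) =====
-- stated objective: simpler
-- what changed: A's four near-duplicated branches, each running an itertools.product loop that rebuilds the prefix per tuple and discards duplicate-letter tuples via a set-length continue, are unified into one prefix/suffix computation, a comp_count->pool dict, and a single itertools.permutations loop with no filtering; the dead initial 'L' assignment is dropped.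
import Mathlib
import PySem

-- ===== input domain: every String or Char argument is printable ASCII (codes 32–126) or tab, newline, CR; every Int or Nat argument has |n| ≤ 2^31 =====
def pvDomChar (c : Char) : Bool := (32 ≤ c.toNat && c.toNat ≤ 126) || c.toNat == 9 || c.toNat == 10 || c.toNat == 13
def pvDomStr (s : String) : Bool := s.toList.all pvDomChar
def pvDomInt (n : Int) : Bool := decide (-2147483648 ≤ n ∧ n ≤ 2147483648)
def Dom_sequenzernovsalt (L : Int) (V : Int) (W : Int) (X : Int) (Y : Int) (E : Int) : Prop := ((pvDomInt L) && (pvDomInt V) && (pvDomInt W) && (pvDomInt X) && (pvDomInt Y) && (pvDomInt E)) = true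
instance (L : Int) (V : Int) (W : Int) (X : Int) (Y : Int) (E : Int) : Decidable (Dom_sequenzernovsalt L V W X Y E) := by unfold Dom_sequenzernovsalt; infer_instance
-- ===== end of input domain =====

-- B replaces A's four near-identical product-loop branches (each with a duplicate-filter
-- `continue`) by one prefix/suffix computation, a pool table and a single permutations loop: simpler.

-- ===== PORT A =====
-- itertools.product("WXY","WXY","WXY") in Python's order
def pvProd3 (s : List Char) : List (List Char) :=
  s.flatMap (fun a => s.flatMap (fun b => s.map (fun c => [a, b, c])))
-- itertools.product("WX","WX")
def pvProd2 (s : List Char) : List (List Char) :=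
  s.flatMap (fun a => s.map (fun b => [a, b]))
-- itertools.product("W")
def pvProd1 (s : List Char) : List (List Char) := s.map (fun a => [a])
-- the loop body A repeats verbatim in each branch (output1 kept as List Char;
-- len(set(output1)) ported as (PySem.Set.ofList output1).length)
def pvLoopBody (L : Int) (E : Int) (sequ : List String) (subset : List Char) : List String :=
  let output1 : List Char := if L == 0 then ['V'] else ['L', 'V']
  let output1 := subset.foldl (fun o p => o ++ [p]) output1
  if output1.length != (PySem.Set.ofList output1).length then sequ
  else
    let output1 := if E == 1 then output1 ++ ['E'] else output1
    sequ ++ [String.mk output1]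

def sequenzernovsalt (L : Int) (V : Int) (W : Int) (X : Int) (Y : Int) (E : Int) : List String :=
  let sequ : List String := []
  let comp_count := V + W + X + Y
  let _output1 : List Char := if L == 1 then ['L'] else []   -- A's dead initial assignment, kept
  if comp_count == 4 then
    (pvProd3 ['W', 'X', 'Y']).foldl (fun sequ subset => pvLoopBody L E sequ subset) sequ
  else if comp_count == 3 then
    (pvProd2 ['W', 'X']).foldl (fun sequ subset => pvLoopBody L E sequ subset) sequ
  else if comp_count == 2 then
    (pvProd1 ['W']).foldl (fun sequ subset => pvLoopBody L E sequ subset) sequ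
  else
    let output1 : List Char := if L == 0 then ['V'] else ['L', 'V']
    let output1 := if E == 1 then output1 ++ ['E'] else output1
    sequ ++ [String.mk output1]

-- ===== PORT B =====
def sequenzernovsalt_alt (L : Int) (V : Int) (W : Int) (X : Int) (Y : Int) (E : Int) : List String :=
  let pfx : List Char := if L == 0 then ['V'] else ['L', 'V']
  let sfx : List Char := if E == 1 then ['E'] else []
  let pools : PySem.Dict Int (List Char) :=
    PySem.Dict.ofList [(4, ['W', 'X', 'Y']), (3, ['W', 'X']), (2, ['W'])]
  match pools.get? (V + W + X + Y) with
  | none => [String.mk (pfx ++ sfx)]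
  | some pool =>
      (PySem.List.permutations pool pool.length).map
        (fun p => String.mk (pfx ++ p ++ sfx))

-- ===== PRECONDITION & SPEC =====
def Spec_sequenzernovsalt (L : Int) (V : Int) (W : Int) (X : Int) (Y : Int) (E : Int) (out : List String) : Prop := out = sequenzernovsalt_alt L V W X Y E
instance (L : Int) (V : Int) (W : Int) (X : Int) (Y : Int) (E : Int) (out : List String) : Decidable (Spec_sequenzernovsalt L V W X Y E out) := by unfold Spec_sequenzernovsalt; infer_instance

-- ===== CLAIM (what is proved, stated in full; the proofs are below) =====
def Claim_equal_sequenzernovsalt : Prop := ∀ (L : Int) (V : Int) (W : Int) (X : Int) (Y : Int) (E : Int), Dom_sequenzernovsalt L V W X Y E → Spec_sequenzernovsalt L V W X Y E (sequenzernovsalt L V W X Y E)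

-- ===== LEMMAS AND PROOFS =====

-- Both programs depend on the inputs only through the six branch tests
-- (comp_count == 4/3/2, L == 0, L == 1, E == 1); generalize those to Booleans and
-- check each of the 64 resulting closed cases by kernel evaluation.
theorem pv_main (L V W X Y E : Int) :
    sequenzernovsalt L V W X Y E = sequenzernovsalt_alt L V W X Y E := by
  have hdict : ∀ c : Int,
      (PySem.Dict.ofList [((4:Int), (['W','X','Y'] : List Char)), (3, ['W','X']), (2, ['W'])]).get? c
      = if c == 4 then some ['W','X','Y'] else if c == 3 then some ['W','X'] else if c == 2 then some ['W'] else none := by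
    intro c
    rw [show (PySem.Dict.ofList [((4:Int), (['W','X','Y'] : List Char)), (3, ['W','X']), (2, ['W'])])
        = PySem.Dict.mk [(4, ['W','X','Y']), (3, ['W','X']), (2, ['W'])] from by decide]
    simp only [PySem.Dict.get?_mk_cons, Bool.beq_comm (a := c)]
    simp [PySem.Dict.get?]
  simp only [sequenzernovsalt, sequenzernovsalt_alt, pvLoopBody, hdict]
  generalize ((V + W + X + Y : Int) == 4) = b4
  generalize ((V + W + X + Y : Int) == 3) = b3
  generalize ((V + W + X + Y : Int) == 2) = b2
  generalize (L == (1:Int)) = bl1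
  generalize (L == (0:Int)) = bl
  generalize (E == (1:Int)) = be
  cases b4 <;> cases b3 <;> cases b2 <;> cases bl1 <;> cases bl <;> cases be <;> decide

-- ===== VERDICT (by name: the statement is the Claim_ definition above) =====
theorem sequenzernovsalt_spec : Claim_equal_sequenzernovsalt := by
  intro L V W X Y E _
  unfold Spec_sequenzernovsalt
  exact pv_main L V W X Y E
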